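-- pv_equiv track=rewrite | github.com/lauriy91/real_state_project | src/utils/array_excersice.py | organize_blocks
-- ===== SOURCE A (Python) =====
-- def organize_blocks(arr):
--     bloques = []
--     actual = []
--
--     for num in arr:
--         if num == 0:
--             bloques.append(actual)
--             actual = []
--         else:
--             actual.append(num)
--     bloques.append(actual)
--
--     partes = []
--     for bloque in bloques:
--         if len(bloque) == 0:
--             partes.append("X")
--         else:
--             bloque.sort()
--             str_num = ""
--             for num in bloque:
--                 str_num += str(num)
--             partes.append(str_num)
--
--     return " ".join(partes)
-- ===== SOURCE B (Python) =====
-- def organize_blocks(arr):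
--     def fmt(block):
--         if not block:
--             return "X"
--         return "".join(str(n) for n in sorted(block))
--
--     def parts(rest):
--         if 0 not in rest:
--             return [fmt(rest)]
--         i = rest.index(0)
--         return [fmt(rest[:i])] + parts(rest[i + 1:])
--
--     return " ".join(parts(arr))
-- ===== Notes on version B (the rewrite author's own statement) =====
-- stated objective: alternative
-- what changed: Replaces A's single-pass flag/accumulator split (mutable current-block list plus append-on-zero) by a recursive first-zero-index decomposition: find the first 0, format the slice before it, and recurse on the slice after it.
import Mathlib
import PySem

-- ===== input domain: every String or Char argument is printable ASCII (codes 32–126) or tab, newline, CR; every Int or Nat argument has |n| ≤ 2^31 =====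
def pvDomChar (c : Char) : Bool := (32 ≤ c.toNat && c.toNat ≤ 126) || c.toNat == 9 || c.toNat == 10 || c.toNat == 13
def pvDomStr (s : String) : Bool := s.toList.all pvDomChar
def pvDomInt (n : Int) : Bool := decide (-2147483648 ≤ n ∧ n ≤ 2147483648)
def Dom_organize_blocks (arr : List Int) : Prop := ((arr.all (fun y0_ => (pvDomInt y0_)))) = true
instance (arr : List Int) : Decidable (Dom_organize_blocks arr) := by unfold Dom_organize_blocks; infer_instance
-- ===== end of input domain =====

-- B replaces A's single-pass flag/accumulator split by a recursive first-zero-index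
-- decomposition (slice before the first 0, recurse after it); alternative, same cost.


-- ===== PORT A =====
-- literal transliteration of A: one fold maintaining (bloques, actual), then for each
-- bloque either "X" or sort-then-concatenate str(num), finally " ".join.
def organize_blocks (arr : List Int) : String :=
  let st := arr.foldl
    (fun (st : List (List Int) × List Int) num =>
      if num == 0 then (st.1 ++ [st.2], ([] : List Int)) else (st.1, st.2 ++ [num]))
    ([], [])
  let bloques := st.1 ++ [st.2]
  let partes := bloques.foldl
    (fun partes bloque =>
      if bloque.length == 0 then partes ++ ["X"]
      else
        let sorted := PySem.List.sorted bloque (fun x => x) false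
        let str_num := sorted.foldl (fun s num => s ++ PySem.Int.toStr num) ""
        partes ++ [str_num])
    []
  PySem.Str.join " " partes

-- ===== PORT B =====
-- B's fmt: "X" for the empty block, else "".join(str(n) for n in sorted(block)).
def pvFmt (block : List Int) : String :=
  if block = [] then "X"
  else PySem.Str.join "" ((PySem.List.sorted block (fun x => x) false).map PySem.Int.toStr)

-- B's parts: split at the first 0 (rest[:i] / rest[i+1:] as take/drop: i = rest.index(0)
-- is a valid nonnegative index here, where the Python slices are exactly take/drop).
def pvParts (rest : List Int) : List String :=
  match h : PySem.List.index? rest (0 : Int) with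
  | none => [pvFmt rest]
  | some i => pvFmt (rest.take i) :: pvParts (rest.drop (i + 1))
termination_by rest.length
decreasing_by
  have hne : rest ≠ [] := by rintro rfl; simp_all [PySem.List.index?]
  have : 0 < rest.length := List.length_pos_iff.mpr hne
  simp [List.length_drop]; omega

def organize_blocks_alt (arr : List Int) : String :=
  PySem.Str.join " " (pvParts arr)

-- ===== PRECONDITION & SPEC =====
def Spec_organize_blocks (arr : List Int) (out : String) : Prop := out = organize_blocks_alt arr
instance (arr : List Int) (out : String) : Decidable (Spec_organize_blocks arr out) := by unfold Spec_organize_blocks; infer_instance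

-- ===== CLAIM (what is proved, stated in full; the proofs are below) =====
def Claim_equal_organize_blocks : Prop := ∀ (arr : List Int), Dom_organize_blocks arr → Spec_organize_blocks arr (organize_blocks arr)

-- ===== LEMMAS AND PROOFS =====

-- the abstract block decomposition both programs compute
def pvPrep (ac : List Int) : List (List Int) → List (List Int)
  | [] => [ac]
  | b :: bs => (ac ++ b) :: bs

def pvSplit : List Int → List (List Int)
  | [] => [[]]
  | x :: xs => if x = 0 then [] :: pvSplit xs else pvPrep [x] (pvSplit xs)

lemma pvSplit_ne_nil (xs : List Int) : pvSplit xs ≠ [] := by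
  cases xs with
  | nil => simp [pvSplit]
  | cons x xs =>
    simp only [pvSplit]
    split_ifs
    · simp
    · cases h : pvSplit xs <;> simp [pvPrep]

lemma pvPrep_nil {l : List (List Int)} (h : l ≠ []) : pvPrep [] l = l := by
  cases l with
  | nil => exact absurd rfl h
  | cons b bs => simp [pvPrep]

lemma pvPrep_prep (ac x : List Int) (l : List (List Int)) :
    pvPrep ac (pvPrep x l) = pvPrep (ac ++ x) l := by
  cases l <;> simp [pvPrep]

-- A's accumulator loop computes pvSplit
lemma foldlA_eq (xs : List Int) : ∀ (bq : List (List Int)) (ac : List Int),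
    (xs.foldl
      (fun (st : List (List Int) × List Int) num =>
        if num == 0 then (st.1 ++ [st.2], ([] : List Int)) else (st.1, st.2 ++ [num]))
      (bq, ac)).1
    ++ [(xs.foldl
      (fun (st : List (List Int) × List Int) num =>
        if num == 0 then (st.1 ++ [st.2], ([] : List Int)) else (st.1, st.2 ++ [num]))
      (bq, ac)).2]
    = bq ++ pvPrep ac (pvSplit xs) := by
  induction xs with
  | nil => intro bq ac; simp [pvSplit, pvPrep]
  | cons x xs ih =>
    intro bq ac
    by_cases hx : x = 0
    · subst hx
      rw [List.foldl_cons, if_pos (by simp), ih]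
      rw [pvPrep_nil (pvSplit_ne_nil xs)]
      simp [pvSplit, pvPrep]
    · rw [List.foldl_cons, if_neg (by simp [hx]), ih]
      simp only [pvSplit, if_neg hx]
      rw [pvPrep_prep]

-- A's partes loop is a map
lemma foldl_partes (f : List Int → String) (l : List (List Int)) :
    ∀ (init : List String),
    (l.foldl (fun partes bloque =>
        if bloque.length == 0 then partes ++ ["X"] else partes ++ [f bloque]) init)
    = init ++ l.map (fun bloque => if bloque.length == 0 then "X" else f bloque) := by
  induction l with
  | nil => intro init; simp
  | cons b bs ih =>
    intro init
    simp only [List.foldl_cons, List.map_cons]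
    by_cases hb : b.length == 0
    · rw [if_pos hb, ih]; simp [hb]
    · rw [if_neg hb, ih]; simp [hb]

-- joining with the empty separator is flattening
lemma join_nil_eq_flatten (l : List (List Char)) :
    PySem.Chars.join [] l = l.flatten := by
  induction l with
  | nil => simp [PySem.Chars.join_nil]
  | cons a t ih =>
    cases t with
    | nil => simp [PySem.Chars.join_singleton]
    | cons b t' => rw [PySem.Chars.join_cons_cons, ih]; simp

-- A's string accumulation equals "".join
lemma foldl_concat_eq_join (l : List String) :
    l.foldl (fun s t => s ++ t) "" = PySem.Str.join "" l := by
  apply String.toList_inj.mp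
  rw [PySem.Str.toList_join]
  have key : ∀ (l : List String) (s : String),
      (l.foldl (fun s t => s ++ t) s).toList
        = s.toList ++ (l.map String.toList).flatten := by
    intro l
    induction l with
    | nil => intro s; simp
    | cons a t ih => intro s; simp [ih, String.toList_append]
  rw [key]
  simp [join_nil_eq_flatten]

lemma fmtA_eq_pvFmt (b : List Int) :
    (if b.length == 0 then "X"
     else (PySem.List.sorted b (fun x => x) false).foldl
        (fun s num => s ++ PySem.Int.toStr num) "") = pvFmt b := by
  unfold pvFmt
  by_cases hb : b = []
  · simp [hb]
  · rw [if_neg (by simp [hb]), if_neg hb]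
    rw [← List.foldl_map (f := PySem.Int.toStr) (g := fun s t => s ++ t)]
    exact foldl_concat_eq_join _

-- pvSplit on a zero-free list
lemma pvSplit_no_zero {xs : List Int} (h : (0 : Int) ∉ xs) : pvSplit xs = [xs] := by
  induction xs with
  | nil => simp [pvSplit]
  | cons x xs ih =>
    have hx : x ≠ 0 := fun hx => h (hx ▸ List.mem_cons_self)
    rw [pvSplit, if_neg hx, ih (fun hm => h (List.mem_cons_of_mem _ hm))]
    simp [pvPrep]

-- pvSplit splits at the first zero
lemma pvSplit_first_zero : ∀ (xs : List Int) (i : Nat),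
    PySem.List.index? xs (0 : Int) = some i →
    pvSplit xs = xs.take i :: pvSplit (xs.drop (i + 1)) := by
  intro xs
  induction xs with
  | nil => intro i h; simp [PySem.List.index?] at h
  | cons x xs ih =>
    intro i h
    by_cases hx : x = 0
    · subst hx
      rw [PySem.List.index?_cons_self] at h
      cases h
      simp [pvSplit]
    · rw [PySem.List.index?_cons_of_ne xs hx] at h
      rcases Option.map_eq_some_iff.mp h with ⟨j, hj, rfl⟩
      rw [pvSplit, if_neg hx, ih j hj]
      simp [pvPrep, List.take_succ_cons, List.drop_succ_cons]

lemma pvParts_eq_map (rest : List Int) : pvParts rest = (pvSplit rest).map pvFmt := by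
  rw [pvParts.eq_def]
  split
  case h_1 h =>
    rw [pvSplit_no_zero ((PySem.List.index?_eq_none_iff rest 0).mp h)]
    simp
  case h_2 i h =>
    rw [pvSplit_first_zero rest i h, List.map_cons,
      pvParts_eq_map (rest.drop (i + 1))]
termination_by rest.length
decreasing_by
  have hne : rest ≠ [] := by rintro rfl; simp_all [PySem.List.index?]
  have : 0 < rest.length := List.length_pos_iff.mpr hne
  simp [List.length_drop]; omega

-- ===== VERDICT (by name: the statement is the Claim_ definition above) =====
theorem organize_blocks_spec : Claim_equal_organize_blocks := by
  intro arr _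
  unfold Spec_organize_blocks organize_blocks organize_blocks_alt
  dsimp only
  rw [pvParts_eq_map]
  have h1 := foldlA_eq arr [] []
  rw [pvPrep_nil (pvSplit_ne_nil arr), List.nil_append] at h1
  rw [h1]
  rw [foldl_partes (fun bloque =>
    (PySem.List.sorted bloque (fun x => x) false).foldl
      (fun s num => s ++ PySem.Int.toStr num) "")]
  rw [List.nil_append]
  congr 1
  exact List.map_congr_left (fun b _ => fmtA_eq_pvFmt b)
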